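-- pv_equiv track=rewrite | github.com/ryanpdev69/vibecoding | app.py | filter_relevant_conversation
-- ===== SOURCE A (Python) =====
-- def filter_relevant_conversation(conversation, request_type):
--     """Filter conversation history to keep only relevant messages"""
--     # For debugging, prioritize recent messages with code
--     if request_type in ['debug_code', 'optimize_code']:
--         relevant_messages = []
--         for msg in conversation:
--             # Include messages with code or recent user interactions
--             if '```' in msg['content'] or msg['role'] == 'user':
--                 relevant_messages.append(msg)
--             elif len(relevant_messages) > 0 and msg['role'] == 'assistant':
--                 relevant_messages.append(msg)  # Include AI responses to user messages
--         return relevant_messages[-10:]  # Last 10 relevant messages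
--
--     # For other types, return recent conversation as-is
--     return conversation
-- ===== SOURCE B (Python) =====
-- def filter_relevant_conversation(conversation, request_type):
--     """Filter conversation history to keep only relevant messages"""
--     if request_type not in ['debug_code', 'optimize_code']:
--         # For other types, return recent conversation as-is
--         return conversation
--     # Locate the first anchor message (code block or user turn); nothing before
--     # it can ever be kept, and everything after it is kept by a stateless test.
--     start = None
--     for i, msg in enumerate(conversation):
--         if '```' in msg['content'] or msg['role'] == 'user':
--             start = i
--             break
--     if start is None:
--         return []
--     kept = [msg for msg in conversation[start:]
--             if '```' in msg['content'] or msg['role'] in ('user', 'assistant')]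
--     return kept[-10:]
-- ===== Notes on version B (the rewrite author's own statement) =====
-- stated objective: alternative
-- what changed: Replaces A's single stateful flag-driven accumulation loop (where keeping an assistant message depends on the accumulator being non-empty) with a two-phase locate-then-filter pass: find the index of the first anchor message ('```' in content or role 'user'), return [] if none, else filter the tail with a stateless predicate and take its last 10. Pre_ excludes debug/optimize inputs containing a message that lacks a 'content' or 'role' key, on which A in general raises KeyError (in rare shapes where the missing key is never consulted both still return the same value).
import Mathlib
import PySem

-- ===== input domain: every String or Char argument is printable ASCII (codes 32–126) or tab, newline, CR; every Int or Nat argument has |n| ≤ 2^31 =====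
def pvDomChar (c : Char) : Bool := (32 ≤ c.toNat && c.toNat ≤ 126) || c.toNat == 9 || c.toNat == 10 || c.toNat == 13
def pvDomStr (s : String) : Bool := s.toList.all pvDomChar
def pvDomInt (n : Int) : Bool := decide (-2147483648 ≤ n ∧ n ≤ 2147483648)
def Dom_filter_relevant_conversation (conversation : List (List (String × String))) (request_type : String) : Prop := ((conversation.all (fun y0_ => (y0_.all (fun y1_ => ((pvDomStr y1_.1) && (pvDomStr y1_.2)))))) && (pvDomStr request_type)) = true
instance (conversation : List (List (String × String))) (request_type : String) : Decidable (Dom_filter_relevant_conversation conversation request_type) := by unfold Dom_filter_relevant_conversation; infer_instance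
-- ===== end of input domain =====

-- B replaces A's stateful flag-driven loop with a locate-first-anchor-then-stateless-filter
-- two-phase pass (objective: alternative decomposition, same cost).

-- msg[k] for the dict msg (first match in the association list); "" only outside Pre_,
-- where Python raises KeyError
def pvGetKey (m : List (String × String)) (k : String) : String :=
  (List.lookup k m).getD ""

-- the condition "'```' in msg['content'] or msg['role'] == 'user'" shared by both sources
def pvAnchor (msg : List (String × String)) : Bool :=
  PySem.Str.isIn "```" (pvGetKey msg "content") || pvGetKey msg "role" == "user"

-- ===== PORT A =====
def filter_relevant_conversation (conversation : List (List (String × String))) (request_type : String) : List (List (String × String)) :=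
  if ["debug_code", "optimize_code"].contains request_type then
    let relevant := conversation.foldl (fun acc msg =>
      if pvAnchor msg then
        acc ++ [msg]
      else if decide (0 < acc.length) && (pvGetKey msg "role" == "assistant") then
        acc ++ [msg]
      else acc) []
    PySem.List.slice relevant (some (-10)) none
  else conversation

-- ===== PORT B =====
-- B's comprehension test "'```' in msg['content'] or msg['role'] in ('user','assistant')"
def pvKeepB (msg : List (String × String)) : Bool :=
  PySem.Str.isIn "```" (pvGetKey msg "content")
    || ["user", "assistant"].contains (pvGetKey msg "role")

def filter_relevant_conversation_alt (conversation : List (List (String × String))) (request_type : String) : List (List (String × String)) :=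
  if ["debug_code", "optimize_code"].contains request_type then
    match conversation.findIdx? pvAnchor with
    | none => []
    | some start =>
      let kept := (conversation.drop start).filter pvKeepB
      PySem.List.slice kept (some (-10)) none
  else conversation

-- ===== PRECONDITION & SPEC =====
-- Pre_ excludes debug/optimize inputs containing a message that lacks a 'content' or 'role'
-- key, on which A in general raises KeyError (in rare shapes where the missing key is never
-- consulted A still returns; B returns the same value there).
def Pre_filter_relevant_conversation (conversation : List (List (String × String))) (request_type : String) : Prop :=
  ["debug_code", "optimize_code"].contains request_type = true →
    ∀ m ∈ conversation, (List.lookup "content" m).isSome ∧ (List.lookup "role" m).isSome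
instance (conversation : List (List (String × String))) (request_type : String) : Decidable (Pre_filter_relevant_conversation conversation request_type) := by unfold Pre_filter_relevant_conversation; infer_instance

def pvWitness_filter_relevant_conversation : (List (List (String × String))) × String :=
  ([[("role", "user"), ("content", "hi")], [("role", "assistant"), ("content", "```x```")]], "debug_code")

def Spec_filter_relevant_conversation (conversation : List (List (String × String))) (request_type : String) (out : List (List (String × String))) : Prop := out = filter_relevant_conversation_alt conversation request_type
instance (conversation : List (List (String × String))) (request_type : String) (out : List (List (String × String))) : Decidable (Spec_filter_relevant_conversation conversation request_type out) := by unfold Spec_filter_relevant_conversation; infer_instance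

-- ===== CLAIM (what is proved, stated in full; the proofs are below) =====
def Claim_equal_filter_relevant_conversation : Prop := ∀ (conversation : List (List (String × String))) (request_type : String), Dom_filter_relevant_conversation conversation request_type → Pre_filter_relevant_conversation conversation request_type → Spec_filter_relevant_conversation conversation request_type (filter_relevant_conversation conversation request_type)

-- ===== LEMMAS AND PROOFS =====

-- A's keep test once the accumulator is non-empty
def pvKeep (msg : List (String × String)) : Bool :=
  pvAnchor msg || pvGetKey msg "role" == "assistant"

-- A's loop body, definitionally equal to the lambda in the port of A
def pvStep (acc : List (List (String × String))) (msg : List (String × String)) : List (List (String × String)) :=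
  if pvAnchor msg then
    acc ++ [msg]
  else if decide (0 < acc.length) && (pvGetKey msg "role" == "assistant") then
    acc ++ [msg]
  else acc

theorem pvStep_nonempty (l : List (List (String × String))) :
    ∀ acc : List (List (String × String)), acc ≠ [] →
      l.foldl pvStep acc = acc ++ l.filter pvKeep := by
  induction l with
  | nil => intro acc _; simp
  | cons h t ih =>
    intro acc hacc
    simp only [List.foldl_cons, List.filter_cons]
    cases h1 : pvAnchor h with
    | true =>
      rw [show pvStep acc h = acc ++ [h] by simp [pvStep, h1]]
      rw [ih _ (by simp), show pvKeep h = true by simp [pvKeep, h1]]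
      simp
    | false =>
      cases h2 : (pvGetKey h "role" == "assistant") with
      | true =>
        rw [show pvStep acc h = acc ++ [h] by
          simp [pvStep, h1, h2, List.length_pos_iff.mpr hacc]]
        rw [ih _ (by simp), show pvKeep h = true by simp [pvKeep, h2]]
        simp
      | false =>
        rw [show pvStep acc h = acc by simp [pvStep, h1, h2]]
        rw [ih _ hacc, show pvKeep h = false by simp [pvKeep, h1, h2]]
        simp

theorem pvLoop_eq (l : List (List (String × String))) :
    l.foldl pvStep [] =
      match l.findIdx? pvAnchor with
      | none => []
      | some s => (l.drop s).filter pvKeep := by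
  induction l with
  | nil => simp
  | cons h t ih =>
    cases h1 : pvAnchor h with
    | true =>
      simp only [List.foldl_cons, List.findIdx?_cons, h1]
      rw [show pvStep [] h = [h] by simp [pvStep, h1]]
      rw [pvStep_nonempty t [h] (by simp)]
      simp [show pvKeep h = true by simp [pvKeep, h1]]
    | false =>
      simp only [List.foldl_cons, List.findIdx?_cons, h1]
      rw [show pvStep [] h = [] by simp [pvStep, h1]]
      rw [ih]
      cases t.findIdx? pvAnchor with
      | none => rfl
      | some s => simp [List.drop_succ_cons]

theorem pvPred_eq (msg : List (String × String)) : pvKeepB msg = pvKeep msg := by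
  simp [pvKeepB, pvKeep, pvAnchor, Bool.or_assoc, Bool.beq_eq_decide_eq]

-- ===== VERDICT (by name: the statement is the Claim_ definition above) =====
theorem filter_relevant_conversation_spec : Claim_equal_filter_relevant_conversation := by
  intro conversation request_type _ _
  unfold Spec_filter_relevant_conversation filter_relevant_conversation filter_relevant_conversation_alt
  by_cases hrt : (["debug_code", "optimize_code"].contains request_type) = true
  · rw [if_pos hrt, if_pos hrt]
    show PySem.List.slice (conversation.foldl pvStep []) (some (-10)) none =
      (match conversation.findIdx? pvAnchor with
       | none => []
       | some s => PySem.List.slice ((conversation.drop s).filter pvKeepB) (some (-10)) none)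
    rw [pvLoop_eq]
    cases conversation.findIdx? pvAnchor with
    | none => rfl
    | some s =>
      simp only
      congr 1
      exact List.filter_congr (fun m _ => (pvPred_eq m).symm)
  · rw [if_neg hrt, if_neg hrt]
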